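-- pv_equiv track=rewrite | github.com/Ellaluvscheese/ModularizationDesign | 03/Lab03.py | jan_to_cur_month_count
-- ===== SOURCE A (Python) =====
-- def jan_to_cur_month_count(user_month, leap_year):
--     month_days = [31, 29, 31, 30, 31, 30, 31, 31, 30, 31, 30, 31]
--     if leap_year:
--         month_days[1] = 28
--     index = user_month - 1
--     sum_days = 0
--     for i in range(index):
--         sum_days = sum_days + month_days[i]
--     return sum_days
-- ===== SOURCE B (Python) =====
-- def month_length(i, leap_year):
--     # per-month length by case analysis (keeps A's inverted February: 28 if leap else 29)
--     if i == 1: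
--         return 28 if leap_year else 29
--     if i in (3, 5, 8, 10):
--         return 30
--     return 31
--
--
-- def jan_to_cur_month_count(user_month, leap_year):
--     def go(n):
--         if n <= 0:
--             return 0
--         return go(n - 1) + month_length(n - 1, leap_year)
--     return go(user_month - 1)
-- ===== Notes on version B (the rewrite author's own statement) =====
-- stated objective: alternative
-- what changed: B drops the month-lengths list entirely: a per-month length function (case analysis on the month index) is summed by structural recursion from user_month-1 down to 0, instead of A's list plus indexing loop.
import Mathlib
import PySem

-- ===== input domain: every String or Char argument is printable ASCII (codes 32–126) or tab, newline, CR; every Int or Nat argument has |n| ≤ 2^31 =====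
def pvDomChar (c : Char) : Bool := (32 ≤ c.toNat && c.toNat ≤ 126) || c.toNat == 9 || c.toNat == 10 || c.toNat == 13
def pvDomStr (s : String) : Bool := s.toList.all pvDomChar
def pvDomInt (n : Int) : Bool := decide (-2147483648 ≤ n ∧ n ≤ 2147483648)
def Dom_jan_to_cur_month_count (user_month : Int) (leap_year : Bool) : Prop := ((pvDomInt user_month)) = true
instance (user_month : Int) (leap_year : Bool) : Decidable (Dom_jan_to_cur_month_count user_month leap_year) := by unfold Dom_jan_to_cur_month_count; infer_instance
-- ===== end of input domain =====

-- B drops A's month-lengths list: a per-month length function is summed by structural recursion.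

-- ===== PORT A =====
def jan_to_cur_month_count (user_month : Int) (leap_year : Bool) : Int :=
  let month_days : List Int := [31, 29, 31, 30, 31, 30, 31, 31, 30, 31, 30, 31]
  let month_days := if leap_year then month_days.set 1 28 else month_days
  let index := user_month - 1
  (PySem.List.pyRange 0 index 1).foldl
    (fun sum_days i => sum_days + PySem.List.pyGetD month_days i 0) 0

-- ===== PORT B =====
-- per-month length by case analysis (keeps A's inverted February)
def pvMonthLength (i : Int) (leap_year : Bool) : Int :=
  if i == 1 then (if leap_year then 28 else 29)
  else if i == 3 || i == 5 || i == 8 || i == 10 then 30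
  else 31

def pvGo (leap_year : Bool) : Nat → Int
  | 0 => 0
  | n + 1 => pvGo leap_year n + pvMonthLength (Int.ofNat n) leap_year

def jan_to_cur_month_count_alt (user_month : Int) (leap_year : Bool) : Int :=
  pvGo leap_year (user_month - 1).toNat

-- ===== PRECONDITION & SPEC =====
-- A raises IndexError when user_month ≥ 14 (the loop reads past the 12-entry list); exactly those inputs are excluded.
def Pre_jan_to_cur_month_count (user_month : Int) (leap_year : Bool) : Prop := user_month ≤ 13
instance (user_month : Int) (leap_year : Bool) : Decidable (Pre_jan_to_cur_month_count user_month leap_year) := by unfold Pre_jan_to_cur_month_count; infer_instance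
def pvWitness_jan_to_cur_month_count : Int × Bool := (7, true)

def Spec_jan_to_cur_month_count (user_month : Int) (leap_year : Bool) (out : Int) : Prop := out = jan_to_cur_month_count_alt user_month leap_year
instance (user_month : Int) (leap_year : Bool) (out : Int) : Decidable (Spec_jan_to_cur_month_count user_month leap_year out) := by unfold Spec_jan_to_cur_month_count; infer_instance

-- ===== CLAIM =====
def Claim_equal_jan_to_cur_month_count : Prop := ∀ (user_month : Int) (leap_year : Bool), Dom_jan_to_cur_month_count user_month leap_year → Pre_jan_to_cur_month_count user_month leap_year → Spec_jan_to_cur_month_count user_month leap_year (jan_to_cur_month_count user_month leap_year)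

-- ===== LEMMAS AND PROOFS =====

-- Both programs return 0 for every non-positive month.
theorem jan_nonpos (user_month : Int) (leap_year : Bool) (h : user_month ≤ 0) :
    jan_to_cur_month_count user_month leap_year = jan_to_cur_month_count_alt user_month leap_year := by
  have h1 : (user_month - 1).toNat = 0 := by omega
  simp only [jan_to_cur_month_count, jan_to_cur_month_count_alt,
    PySem.List.pyRange_one_eq_nil (show user_month - 1 ≤ 0 by omega), h1]
  simp [pvGo]

-- ===== VERDICT =====
set_option maxRecDepth 20000 in
theorem jan_to_cur_month_count_spec : Claim_equal_jan_to_cur_month_count := by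
  intro user_month leap_year _ hpre
  unfold Spec_jan_to_cur_month_count
  by_cases h : user_month ≤ 0
  · exact jan_nonpos user_month leap_year h
  · have h1 : 1 ≤ user_month := by omega
    have h2 : user_month ≤ 13 := hpre
    interval_cases user_month <;> cases leap_year <;> decide
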